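-- pv_equiv track=rewrite | github.com/StratoSource/StratoSource | stratosource/management/commands/sfdiff.py | compareObjectMaps
-- ===== SOURCE A (Python) =====
-- def compareObjectMaps(lmap, rmap):
--     missing = {}
--     updates = {}
--
--     for lname, lnodestring in lmap.items():
--         # find the field in the other file
--         if lname in rmap:
--             rnodestring = rmap[lname]
--             # compare for changes
--             if lnodestring != rnodestring:
--                 updates[lname] = rnodestring
--         else:
--             # field missing on right, must be deleted
--             missing[lname] = lnodestring
--     return updates, missing
-- ===== SOURCE B (Python) =====
-- def compareObjectMaps(lmap, rmap):
--     # Divide and conquer: split the item list in half, classify each half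
--     # recursively, and merge the (updates, missing) pairs in order.
--     def go(items):
--         n = len(items)
--         if n == 0:
--             return {}, {}
--         if n == 1:
--             k, v = items[0]
--             if k in rmap:
--                 return ({k: rmap[k]} if v != rmap[k] else {}), {}
--             return {}, {k: v}
--         mid = n // 2
--         u1, m1 = go(items[:mid])
--         u2, m2 = go(items[mid:])
--         return {**u1, **u2}, {**m1, **m2}
--     return go(list(lmap.items()))
-- ===== Notes on version B (the rewrite author's own statement) =====
-- stated objective: alternative
-- what changed: Replaces A's single left-to-right fold carrying two accumulator dicts by a divide-and-conquer recursion that splits the item list in half, classifies each half independently, and merges the two (updates, missing) pairs by dict concatenation.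
import Mathlib
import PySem

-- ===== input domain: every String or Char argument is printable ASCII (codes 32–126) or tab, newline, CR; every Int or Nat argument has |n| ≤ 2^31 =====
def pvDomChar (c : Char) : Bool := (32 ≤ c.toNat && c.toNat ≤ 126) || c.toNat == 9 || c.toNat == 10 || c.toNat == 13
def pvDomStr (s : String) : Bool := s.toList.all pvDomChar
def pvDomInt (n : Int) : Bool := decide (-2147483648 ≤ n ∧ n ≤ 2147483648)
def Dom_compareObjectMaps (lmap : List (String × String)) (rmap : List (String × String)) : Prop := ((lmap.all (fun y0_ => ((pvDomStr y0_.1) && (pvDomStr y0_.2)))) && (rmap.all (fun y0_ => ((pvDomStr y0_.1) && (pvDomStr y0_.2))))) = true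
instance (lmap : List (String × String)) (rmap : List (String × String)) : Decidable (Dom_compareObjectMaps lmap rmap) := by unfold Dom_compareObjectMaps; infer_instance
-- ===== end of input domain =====

-- B replaces A's single left-to-right fold over two accumulator dicts by a divide-and-conquer
-- recursion (split in half, classify each half, concatenate the result pairs) — alternative decomposition, same results.

-- ===== PORT A =====
def compareObjectMaps (lmap : List (String × String)) (rmap : List (String × String)) : (List (String × String)) × (List (String × String)) :=
  -- missing = {}; updates = {}; one loop over lmap.items(), branching on membership in rmap
  let st := lmap.foldl
    (fun (st : PySem.Dict String String × PySem.Dict String String) p =>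
      match rmap.lookup p.1 with            -- 'if lname in rmap: rnodestring = rmap[lname]'
      | some rnodestring =>
          if p.2 ≠ rnodestring then (st.1.insert p.1 rnodestring, st.2) else st
      | none => (st.1, st.2.insert p.1 p.2))
    (PySem.Dict.empty, PySem.Dict.empty)
  (st.1.items, st.2.items)

-- ===== PORT B =====
-- def go(items): length 0 / length 1 base cases, else split at n // 2, recurse, merge the pairs
def cmpGo (rmap : List (String × String)) (items : List (String × String)) :
    (List (String × String)) × (List (String × String)) :=
  match items with
  | [] => ([], [])
  | [p] =>
      (match rmap.lookup p.1 with
       | some r => (if p.2 ≠ r then [(p.1, r)] else [], [])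
       | none => ([], [p]))
  | a :: b :: t =>
      let l := a :: b :: t
      let mid := l.length / 2
      let r1 := cmpGo rmap (l.take mid)
      let r2 := cmpGo rmap (l.drop mid)
      (r1.1 ++ r2.1, r1.2 ++ r2.2)
termination_by items.length
decreasing_by
  · simp [List.length_take]; omega
  · simp [List.length_drop]; omega

def compareObjectMaps_alt (lmap : List (String × String)) (rmap : List (String × String)) : (List (String × String)) × (List (String × String)) :=
  cmpGo rmap lmap

-- ===== PRECONDITION & SPEC =====
-- Pre_ excludes association lists whose lmap keys repeat: A's argument is a Python dict, so duplicate
-- keys never arise from any Python input, and B's concatenation order on such raw lists is accidental.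
def Pre_compareObjectMaps (lmap : List (String × String)) (rmap : List (String × String)) : Prop :=
  (lmap.map Prod.fst).Nodup
instance (lmap : List (String × String)) (rmap : List (String × String)) : Decidable (Pre_compareObjectMaps lmap rmap) := by unfold Pre_compareObjectMaps; infer_instance
def pvWitness_compareObjectMaps : (List (String × String)) × (List (String × String)) :=
  ([("a", "1"), ("b", "2"), ("c", "3")], [("a", "9"), ("c", "3")])

def Spec_compareObjectMaps (lmap : List (String × String)) (rmap : List (String × String)) (out : (List (String × String)) × (List (String × String))) : Prop := out = compareObjectMaps_alt lmap rmap
instance (lmap : List (String × String)) (rmap : List (String × String)) (out : (List (String × String)) × (List (String × String))) : Decidable (Spec_compareObjectMaps lmap rmap out) := by unfold Spec_compareObjectMaps; infer_instance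

-- ===== CLAIM (what is proved, stated in full; the proofs are below) =====
def Claim_equal_compareObjectMaps : Prop := ∀ (lmap : List (String × String)) (rmap : List (String × String)), Dom_compareObjectMaps lmap rmap → Pre_compareObjectMaps lmap rmap → Spec_compareObjectMaps lmap rmap (compareObjectMaps lmap rmap)

-- ===== LEMMAS AND PROOFS =====

-- closed forms both sides reach: per-item classification of lmap against rmap
def updRow (rmap : List (String × String)) (p : String × String) : Option (String × String) :=
  match rmap.lookup p.1 with
  | some r => if p.2 ≠ r then some (p.1, r) else none
  | none => none

def misRow (rmap : List (String × String)) (p : String × String) : Option (String × String) :=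
  match rmap.lookup p.1 with
  | some _ => none
  | none => some p

-- B's divide-and-conquer computes the two filterMaps
theorem cmpGo_eq (rmap : List (String × String)) (items : List (String × String)) :
    cmpGo rmap items = (items.filterMap (updRow rmap), items.filterMap (misRow rmap)) := by
  induction items using cmpGo.induct rmap with
  | case1 => simp [cmpGo]
  | case2 p r h =>
      simp [cmpGo, updRow, misRow, h]; split <;> simp_all
  | case3 p h =>
      rw [cmpGo, h]
      simp [updRow, misRow, h]
  | case4 a b t lv midv ih1 ih2 =>
      simp only [cmpGo]
      rw [ih1, ih2]
      have hsplit : (a :: b :: t).take ((a :: b :: t).length / 2) ++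
          (a :: b :: t).drop ((a :: b :: t).length / 2) = a :: b :: t := List.take_append_drop _ _
      simp only [Prod.mk.injEq]
      constructor <;> (rw [← List.filterMap_append]; rw [hsplit])

-- A's fold, started from dicts whose keys avoid the (nodup) keys of l, appends the filterMaps
theorem foldA_items (rmap : List (String × String)) :
    ∀ (l : List (String × String)) (u m : PySem.Dict String String),
    (l.map Prod.fst).Nodup →
    (∀ p ∈ l, u.contains p.1 = false) →
    (∀ p ∈ l, m.contains p.1 = false) →
    (l.foldl
      (fun (st : PySem.Dict String String × PySem.Dict String String) p =>
        match rmap.lookup p.1 with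
        | some rnodestring =>
            if p.2 ≠ rnodestring then (st.1.insert p.1 rnodestring, st.2) else st
        | none => (st.1, st.2.insert p.1 p.2)) (u, m))
    = (PySem.Dict.mk (u.items ++ l.filterMap (updRow rmap)),
       PySem.Dict.mk (m.items ++ l.filterMap (misRow rmap))) := by
  intro l
  induction l with
  | nil => intro u m _ _ _; simp
  | cons p t ih =>
      intro u m hnd hu hm
      have hnd' := List.nodup_cons.mp (show (p.1 :: t.map Prod.fst).Nodup by simpa using hnd)
      have hndt : (t.map Prod.fst).Nodup := hnd'.2
      have hpt : ∀ q ∈ t, q.1 ≠ p.1 := by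
        intro q hq h
        exact hnd'.1 (h ▸ List.mem_map_of_mem (f := Prod.fst) hq)
      simp only [List.foldl_cons]
      rcases h : rmap.lookup p.1 with _ | r
      · -- missing branch: insert into m
        have hins : (m.insert p.1 p.2).items = m.items ++ [(p.1, p.2)] :=
          PySem.Dict.items_insert_of_not_contains _ _ (hm p (by simp))
        rw [ih u (m.insert p.1 p.2) hndt
            (fun q hq => hu q (List.mem_cons_of_mem _ hq))
            (fun q hq => by
              rw [PySem.Dict.contains_insert]
              simp [hpt q hq, hm q (List.mem_cons_of_mem _ hq)])]
        simp [updRow, misRow, h, hins]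
      · by_cases hv : p.2 = r
        · simp only [hv, ne_eq, not_true_eq_false, if_false]
          rw [ih u m hndt
              (fun q hq => hu q (List.mem_cons_of_mem _ hq))
              (fun q hq => hm q (List.mem_cons_of_mem _ hq))]
          simp [updRow, misRow, h, hv]
        · simp only [ne_eq, hv, not_false_eq_true, if_true]
          have hins : (u.insert p.1 r).items = u.items ++ [(p.1, r)] :=
            PySem.Dict.items_insert_of_not_contains _ _ (hu p (by simp))
          rw [ih (u.insert p.1 r) m hndt
              (fun q hq => by
                rw [PySem.Dict.contains_insert]
                simp [hpt q hq, hu q (List.mem_cons_of_mem _ hq)])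
              (fun q hq => hm q (List.mem_cons_of_mem _ hq))]
          simp [updRow, misRow, h, hv, hins]

-- ===== VERDICT (by name: the statement is the Claim_ definition above) =====
theorem compareObjectMaps_spec : Claim_equal_compareObjectMaps := by
  intro lmap rmap _ hpre
  unfold Spec_compareObjectMaps compareObjectMaps compareObjectMaps_alt
  rw [foldA_items rmap lmap PySem.Dict.empty PySem.Dict.empty hpre
      (fun q _ => by simp [PySem.Dict.contains_empty]) (fun q _ => by simp [PySem.Dict.contains_empty])]
  rw [cmpGo_eq]
  rfl
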